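-- pv_equiv track=rewrite | github.com/pasin2545/data-struc | 63010656_5.py | bon
-- ===== SOURCE A (Python) =====
-- def bon(w):
-- 	### Enter Your Code Here ###
--     for i in range(0,len(w)) :
--         for j in range(i+1,len(w)):
--             if w[i] == w[j]:
--                 if w[i]=='a':
--                     a = 1
--                 elif w[i]=='b':
--                     a = 2
--                 elif w[i]=='c':
--                     a = 3
--                 elif w[i]=='d':
--                     a = 4
--                 elif w[i]=='e':
--                     a = 5
--                 elif w[i]=='f':
--                     a = 6
--                 elif w[i]=='g':
--                     a = 7
--                 elif w[i]=='h':
--                     a = 8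
--                 elif w[i]=='i':
--                     a = 9
--                 elif w[i]=='j':
--                     a = 10
--                 elif w[i]=='k':
--                     a = 11
--                 elif w[i]=='l':
--                     a = 12
--                 elif w[i]=='m':
--                     a = 13
--                 elif w[i]=='n':
--                     a = 14
--                 elif w[i]=='o':
--                     a = 15
--                 elif w[i]=='p':
--                     a = 16
--                 elif w[i]=='q':
--                     a = 17
--                 elif w[i]=='r':
--                     a  = 18
--                 elif w[i]=='s':
--                     a = 19
--                 elif w[i]=='t':
--                     a = 20
--                 elif w[i]=='u':
--                     a = 21
--                 elif w[i]=='v':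
--                     a   = 22
--                 elif w[i]=='w':
--                     a = 23
--                 elif w[i]=='x':
--                     a = 24
--                 elif w[i]=='y':
--                     a = 25
--                 elif w[i]=='z':
--                     a = 26
--                 a = a*4
--                 b = str(a)
--     return b
-- ===== SOURCE B (Python) =====
-- def bon(w):
--     # O(n): scan right-to-left; the first char already seen (to its right) is the
--     # last index whose char has a later duplicate -- A's answer.
--     seen = set()
--     for c in reversed(w):
--         if c in seen:
--             return str(("abcdefghijklmnopqrstuvwxyz".index(c) + 1) * 4)
--         seen.add(c)
--     raise ValueError("no repeated character")
-- ===== Notes on version B (the rewrite author's own statement) =====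
-- stated objective: faster
-- what changed: Replaces the O(n^2) nested index loops and the 26-branch elif chain with a single right-to-left scan over a seen-set and an alphabet-index lookup, returning at the first (i.e. rightmost) character that has a later duplicate.
-- outside the precondition, e.g. on bon('aaXX'): A returns '16', B raises ValueError
import Mathlib
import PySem

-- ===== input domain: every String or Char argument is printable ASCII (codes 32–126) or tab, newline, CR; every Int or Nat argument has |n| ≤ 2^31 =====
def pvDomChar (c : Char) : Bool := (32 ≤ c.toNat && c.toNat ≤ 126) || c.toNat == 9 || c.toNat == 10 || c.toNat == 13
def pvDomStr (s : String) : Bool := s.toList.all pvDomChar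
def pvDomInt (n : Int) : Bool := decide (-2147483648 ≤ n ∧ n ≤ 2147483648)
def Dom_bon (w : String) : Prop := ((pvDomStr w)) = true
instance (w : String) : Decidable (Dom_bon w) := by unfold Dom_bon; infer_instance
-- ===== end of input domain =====

-- B replaces A's O(n^2) nested index loops (and the 26-branch elif chain) by one
-- right-to-left scan with a seen-set plus an alphabet-index lookup (objective: faster).

-- ===== PORT A =====
-- the elif chain: some rank for 'a'..'z', none = no branch taken (a keeps its old value)
def bonRank (c : Char) : Option Int :=
  if c = 'a' then some 1 else if c = 'b' then some 2 else if c = 'c' then some 3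
  else if c = 'd' then some 4 else if c = 'e' then some 5 else if c = 'f' then some 6
  else if c = 'g' then some 7 else if c = 'h' then some 8 else if c = 'i' then some 9
  else if c = 'j' then some 10 else if c = 'k' then some 11 else if c = 'l' then some 12
  else if c = 'm' then some 13 else if c = 'n' then some 14 else if c = 'o' then some 15
  else if c = 'p' then some 16 else if c = 'q' then some 17 else if c = 'r' then some 18
  else if c = 's' then some 19 else if c = 't' then some 20 else if c = 'u' then some 21
  else if c = 'v' then some 22 else if c = 'w' then some 23 else if c = 'x' then some 24
  else if c = 'y' then some 25 else if c = 'z' then some 26 else none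

-- locals a, b as Options (none = unbound; where Python would raise UnboundLocalError
-- the port keeps the state / returns "" — those inputs are excluded by Pre_)
def bon (w : String) : String :=
  ((PySem.List.pyRange 0 (w.toList.length : Int) 1).foldl (fun st i =>
      (PySem.List.pyRange (i + 1) (w.toList.length : Int) 1).foldl
        (fun (st : Option Int × Option String) j =>
          match PySem.List.pyGet? w.toList i, PySem.List.pyGet? w.toList j with
          | some ci, some cj =>
            if ci = cj then
              match (bonRank ci).orElse (fun _ => st.1) with
              | some a0 => (some (a0 * 4), some (PySem.Int.toStr (a0 * 4)))
              | none => st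
            else st
          | _, _ => st) st)
      ((none, none) : Option Int × Option String)).2.getD ""

-- ===== PORT B =====
def bonAlpha : List Char := "abcdefghijklmnopqrstuvwxyz".toList

def bonGo : List Char → PySem.Set Char → String
  | [], _ => ""                      -- Python: raise ValueError (outside Pre_)
  | c :: rest, seen =>
    if PySem.Set.contains seen c then
      match PySem.List.index? bonAlpha c with
      | some k => PySem.Int.toStr (((k : Int) + 1) * 4)
      | none => ""                   -- Python: ValueError from .index (outside Pre_)
    else bonGo rest (PySem.Set.add seen c)

def bon_alt (w : String) : String := bonGo w.toList.reverse PySem.Set.empty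

-- ===== PRECONDITION & SPEC =====
-- Pre_ excludes the inputs where the Python A raises UnboundLocalError (no repeated
-- character, or the character of the first repeated pair is not a lowercase letter)
-- and those where A returns a stale repeatedly-quadrupled leftover value because a
-- later repeated character is not a lowercase letter (e.g. "aaXX" -> "16"), where
-- B's .index raises ValueError.
def Pre_bon (w : String) : Prop :=
  (w.toList.any (fun c => 2 ≤ w.toList.count c)) = true ∧
  (w.toList.all (fun c => !decide (2 ≤ w.toList.count c)
      || (decide (97 ≤ c.toNat) && decide (c.toNat ≤ 122)))) = true
instance (w : String) : Decidable (Pre_bon w) := by unfold Pre_bon; infer_instance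

def pvWitness_bon : String := "abca"

def Spec_bon (w : String) (out : String) : Prop := out = bon_alt w
instance (w : String) (out : String) : Decidable (Spec_bon w out) := by unfold Spec_bon; infer_instance

-- ===== CLAIM (what is proved, stated in full; the proofs are below) =====
def Claim_equal_bon : Prop := ∀ (w : String), Dom_bon w → Pre_bon w → Spec_bon w (bon w)

-- ===== LEMMAS AND PROOFS =====

-- 97..122 are exactly the code points of 'a'..'z'
set_option maxRecDepth 8192 in
lemma mem_alpha_of_range (c : Char) (hl : 97 ≤ c.toNat) (hr : c.toNat ≤ 122) :
    c ∈ bonAlpha := by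
  have hc : c = Char.ofNat c.toNat := by simp [Char.ofNat_toNat]
  interval_cases h : c.toNat <;> rw [hc] <;> decide

-- the pair (a, b) A's inner assignment leaves for a repeated lowercase char c
def bonV (c : Char) : Option Int × Option String :=
  match bonRank c with
  | some r => (some (r * 4), some (PySem.Int.toStr (r * 4)))
  | none => (none, none)

-- the last index i < m whose char occurs again later in cs (or lies in seen): its char
def bonFound (cs : List Char) : Nat → PySem.Set Char → Option Char
  | 0, _ => none
  | m + 1, seen =>
    if (cs.drop (m + 1)).contains (cs.getD m ' ') || PySem.Set.contains seen (cs.getD m ' ')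
    then some (cs.getD m ' ')
    else bonFound cs m seen

set_option maxRecDepth 8192 in
lemma bonRank_alpha : ∀ c ∈ bonAlpha,
    bonRank c = (PySem.List.index? bonAlpha c).map (fun k => (k : Int) + 1) := by
  have h : bonAlpha.all
      (fun c => bonRank c == (PySem.List.index? bonAlpha c).map (fun k => (k : Int) + 1)) = true := by
    decide
  intro c hc
  exact eq_of_beq (List.all_eq_true.mp h c hc)

lemma foldl_if_const {β : Type} (c0 : Char) (V : β) :
    ∀ (l : List Char) (st : β),
      l.foldl (fun st c => if c0 = c then V else st) st = if l.contains c0 then V else st := by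
  intro l
  induction l with
  | nil => intro st; simp
  | cons c t ih =>
    intro st
    by_cases h : c0 = c
    · subst h; simp [List.foldl_cons, ih]
    · simp [List.foldl_cons, h, ih]

lemma foldl_if_id_of_not_mem {β : Type} (c0 : Char) (f : β → β) :
    ∀ (l : List Char) (st : β), c0 ∉ l →
      l.foldl (fun st c => if c0 = c then f st else st) st = st := by
  intro l
  induction l with
  | nil => intro st _; rfl
  | cons c t ih =>
    intro st h
    simp only [List.mem_cons, not_or] at h
    simp [List.foldl_cons, Ne.symm, h.1, ih _ h.2]

lemma bon_inner (cs : List Char) (i : Nat) (hi : i < cs.length)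
    (st : Option Int × Option String)
    (hr : (bonRank cs[i]).isSome = true ∨ cs[i] ∉ cs.drop (i + 1)) :
    (PySem.List.pyRange ((i : Int) + 1) (cs.length : Int) 1).foldl
        (fun (st : Option Int × Option String) j =>
          match PySem.List.pyGet? cs (i : Int), PySem.List.pyGet? cs j with
          | some ci, some cj =>
            if ci = cj then
              match (bonRank ci).orElse (fun _ => st.1) with
              | some a0 => (some (a0 * 4), some (PySem.Int.toStr (a0 * 4)))
              | none => st
            else st
          | _, _ => st) st
      = if (cs.drop (i + 1)).contains cs[i] then bonV cs[i] else st := by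
  have hget : PySem.List.pyGet? cs (i : Int) = some cs[i] := by
    rw [PySem.List.pyGet?_natCast]; exact List.getElem?_eq_getElem hi
  have hcongr : (PySem.List.pyRange ((i : Int) + 1) (cs.length : Int) 1).foldl
        (fun (st : Option Int × Option String) j =>
          match PySem.List.pyGet? cs (i : Int), PySem.List.pyGet? cs j with
          | some ci, some cj =>
            if ci = cj then
              match (bonRank ci).orElse (fun _ => st.1) with
              | some a0 => (some (a0 * 4), some (PySem.Int.toStr (a0 * 4)))
              | none => st
            else st
          | _, _ => st) st
      = (PySem.List.pyRange ((i : Int) + 1) (cs.length : Int) 1).foldl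
        (fun (st : Option Int × Option String) j =>
          (fun (st : Option Int × Option String) (c : Char) =>
            if cs[i] = c then
              match (bonRank cs[i]).orElse (fun _ => st.1) with
              | some a0 => (some (a0 * 4), some (PySem.Int.toStr (a0 * 4)))
              | none => st
            else st) st (PySem.List.pyGetD cs j ' ')) st := by
    apply PySem.List.foldl_congr_mem
    intro acc j hj
    rw [PySem.List.mem_pyRange_one] at hj
    have hj0 : 0 ≤ j := by omega
    have hjn : j.toNat < cs.length := by omega
    have : PySem.List.pyGet? cs j = some (PySem.List.pyGetD cs j ' ') := by
      have hc : j = ((j.toNat : Nat) : Int) := by omega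
      rw [hc, PySem.List.pyGet?_natCast, PySem.List.pyGetD_natCast]
      simp [List.getElem?_eq_getElem hjn, List.getD_eq_getElem?_getD]
    rw [hget, this]
  rw [hcongr]
  have hlen : (cs.length : Int) = PySem.List.len cs := by simp [PySem.List.len]
  rw [hlen, PySem.List.foldl_pyRange_pyGetD cs ' '
      (fun (st : Option Int × Option String) (c : Char) =>
            if cs[i] = c then
              match (bonRank cs[i]).orElse (fun _ => st.1) with
              | some a0 => (some (a0 * 4), some (PySem.Int.toStr (a0 * 4)))
              | none => st
            else st) st (by omega : (0:Int) ≤ (i:Int)+1)]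
  have htn : ((i : Int) + 1).toNat = i + 1 := by omega
  rw [htn]
  rcases hr with hr | hr
  · obtain ⟨r, hrr⟩ := Option.isSome_iff_exists.mp hr
    have : (fun (st : Option Int × Option String) (c : Char) =>
            if cs[i] = c then
              match (bonRank cs[i]).orElse (fun _ => st.1) with
              | some a0 => (some (a0 * 4), some (PySem.Int.toStr (a0 * 4)))
              | none => st
            else st)
        = fun st c => if cs[i] = c then bonV cs[i] else st := by
      funext st c
      simp [hrr, Option.orElse, bonV]
    rw [this, foldl_if_const]
  · rw [foldl_if_id_of_not_mem _ _ _ _ hr]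
    have hc : (List.drop (i + 1) cs).contains cs[i] = false := by simpa using hr
    rw [hc]
    simp

lemma bon_outer (cs : List Char)
    (hP : ∀ i (_ : i < cs.length), cs[i] ∈ cs.drop (i + 1) → (bonRank cs[i]).isSome = true) :
    ∀ m, m ≤ cs.length →
      (PySem.List.pyRange 0 (m : Int) 1).foldl (fun st i =>
        (PySem.List.pyRange (i + 1) (cs.length : Int) 1).foldl
          (fun (st : Option Int × Option String) j =>
            match PySem.List.pyGet? cs i, PySem.List.pyGet? cs j with
            | some ci, some cj =>
              if ci = cj then
                match (bonRank ci).orElse (fun _ => st.1) with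
                | some a0 => (some (a0 * 4), some (PySem.Int.toStr (a0 * 4)))
                | none => st
              else st
            | _, _ => st) st)
        ((none, none) : Option Int × Option String)
      = match bonFound cs m PySem.Set.empty with
        | some c => bonV c
        | none => ((none, none) : Option Int × Option String) := by
  intro m
  induction m with
  | zero =>
    intro _
    rw [PySem.List.pyRange_one_eq_nil (by omega)]
    rfl
  | succ m ih =>
    intro hm1
    have hm : m < cs.length := by omega
    have hcast : ((m + 1 : Nat) : Int) = (m : Int) + 1 := by push_cast; ring
    rw [hcast, PySem.List.pyRange_one_succ_right (by omega), List.foldl_append,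
        ih (by omega)]
    simp only [List.foldl_cons, List.foldl_nil]
    have hget : cs.getD m ' ' = cs[m] := by
      simp [List.getD_eq_getElem?_getD, List.getElem?_eq_getElem hm]
    have hr : (bonRank cs[m]).isSome = true ∨ cs[m] ∉ cs.drop (m + 1) := by
      by_cases hmem : cs[m] ∈ cs.drop (m + 1)
      · exact Or.inl (hP m hm hmem)
      · exact Or.inr hmem
    rw [bon_inner cs m hm _ hr]
    show _ = match bonFound cs (m + 1) PySem.Set.empty with
      | some c => bonV c
      | none => ((none, none) : Option Int × Option String)
    rw [bonFound, hget]
    have hse : PySem.Set.contains PySem.Set.empty cs[m] = false := rfl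
    rw [hse, Bool.or_false]
    by_cases hc : (cs.drop (m + 1)).contains cs[m] = true
    · rw [hc]; simp
    · rw [Bool.eq_false_iff.mpr hc]; simp

def bonBVal (c : Char) : String :=
  match PySem.List.index? bonAlpha c with
  | some k => PySem.Int.toStr (((k : Int) + 1) * 4)
  | none => ""

lemma bonFound_snoc (ys : List Char) (c : Char) (seen : PySem.Set Char) :
    ∀ m, m ≤ ys.length →
      bonFound (ys ++ [c]) m seen = bonFound ys m (PySem.Set.add seen c) := by
  intro m
  induction m with
  | zero => intro _; rfl
  | succ m ih =>
    intro hm1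
    have hm : m < ys.length := by omega
    have hget : (ys ++ [c]).getD m ' ' = ys.getD m ' ' := by
      have h1 : m < (ys ++ [c]).length := by simp; omega
      simp [List.getD_eq_getElem?_getD, List.getElem?_eq_getElem hm,
            List.getElem?_eq_getElem h1, List.getElem_append_left hm]
    have hdrop : (ys ++ [c]).drop (m + 1) = ys.drop (m + 1) ++ [c] :=
      List.drop_append_of_le_length (by omega)
    have hcond : ∀ x : Char,
        (((ys ++ [c]).drop (m + 1)).contains x || PySem.Set.contains seen x)
          = ((ys.drop (m + 1)).contains x || PySem.Set.contains (PySem.Set.add seen c) x) := by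
      intro x
      rw [hdrop]
      by_cases hx : x ∈ ys.drop (m + 1) <;>
        by_cases hxs : x ∈ seen <;>
          by_cases hxc : x = c <;>
            simp [hx, hxs, hxc, PySem.Set.mem_add]
    rw [bonFound, bonFound, hget, hcond, ih (by omega)]

lemma bonGo_eq_found : ∀ (cs : List Char) (seen : PySem.Set Char),
    bonGo cs.reverse seen
      = match bonFound cs cs.length seen with
        | some c => bonBVal c
        | none => "" := by
  intro cs
  induction cs using List.reverseRecOn with
  | nil => intro seen; rfl
  | append_singleton ys c ih =>
    intro seen
    rw [List.reverse_append, List.reverse_singleton, List.singleton_append, bonGo]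
    have hlen : (ys ++ [c]).length = ys.length + 1 := by simp
    rw [hlen, bonFound]
    have hget : (ys ++ [c]).getD ys.length ' ' = c := by
      simp [List.getD_eq_getElem?_getD]
    have hdrop : (ys ++ [c]).drop (ys.length + 1) = [] := by
      simp
    rw [hget, hdrop]
    have hnil : (([] : List Char).contains c) = false := rfl
    rw [hnil, Bool.false_or]
    by_cases hs : PySem.Set.contains seen c = true
    · rw [hs]
      simp [bonBVal]
    · rw [Bool.eq_false_iff.mpr hs]
      simp only [Bool.false_eq_true, if_false]
      rw [ih (PySem.Set.add seen c), bonFound_snoc ys c seen ys.length (le_refl _)]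

lemma count_two_of_dup (cs : List Char) (i : Nat) (hi : i < cs.length)
    (hmem : cs[i] ∈ cs.drop (i + 1)) : 2 ≤ cs.count cs[i] := by
  have h1 : 0 < (cs.take (i + 1)).count cs[i] := by
    rw [List.count_pos_iff]
    have hl : i < (cs.take (i + 1)).length := by simp [List.length_take]; omega
    have hg : (cs.take (i + 1))[i] = cs[i] := List.getElem_take
    rw [← hg]
    exact List.getElem_mem hl
  have h2 : 0 < (cs.drop (i + 1)).count cs[i] := List.count_pos_iff.mpr hmem
  calc 2 ≤ (cs.take (i + 1)).count cs[i] + (cs.drop (i + 1)).count cs[i] := by omega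
    _ = cs.count cs[i] := by rw [← List.count_append, List.take_append_drop]

lemma bonFound_count (cs : List Char) :
    ∀ m c, m ≤ cs.length → bonFound cs m PySem.Set.empty = some c →
      c ∈ cs ∧ 2 ≤ cs.count c := by
  intro m
  induction m with
  | zero => intro c _ h; exact absurd h (by simp [bonFound])
  | succ m ih =>
    intro c hm1 h
    have hm : m < cs.length := by omega
    have hget : cs.getD m ' ' = cs[m] := by
      simp [List.getD_eq_getElem?_getD, List.getElem?_eq_getElem hm]
    rw [bonFound, hget] at h
    have hse : PySem.Set.contains PySem.Set.empty cs[m] = false := rfl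
    rw [hse, Bool.or_false] at h
    by_cases hc : (cs.drop (m + 1)).contains cs[m] = true
    · rw [hc] at h
      simp at h
      subst h
      refine ⟨List.getElem_mem hm, count_two_of_dup cs m hm ?_⟩
      simpa using hc
    · rw [Bool.eq_false_iff.mpr hc] at h
      simp only [Bool.false_eq_true, if_false] at h
      exact ih c (by omega) h

-- ===== VERDICT (by name: the statement is the Claim_ definition above) =====
theorem bon_spec : Claim_equal_bon := by
  intro w _ hPre
  have h2 : ∀ c ∈ w.toList, 2 ≤ w.toList.count c → 97 ≤ c.toNat ∧ c.toNat ≤ 122 := by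
    intro c hc hcnt
    have hb := List.all_eq_true.mp hPre.2 c hc
    simp [hcnt] at hb
    exact hb
  unfold Spec_bon bon bon_alt
  have hP : ∀ i (_ : i < w.toList.length), w.toList[i] ∈ w.toList.drop (i + 1) →
      (bonRank w.toList[i]).isSome = true := by
    intro i hi hmem
    have hcnt := count_two_of_dup w.toList i hi hmem
    have hmemA := mem_alpha_of_range _ (h2 w.toList[i] (List.getElem_mem hi) hcnt).1
      (h2 w.toList[i] (List.getElem_mem hi) hcnt).2
    rw [bonRank_alpha _ hmemA]
    obtain ⟨k, hk⟩ := Option.isSome_iff_exists.mp ((PySem.List.index?_isSome_iff _ _).mpr hmemA)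
    rw [hk]
    rfl
  rw [bon_outer w.toList hP w.toList.length (le_refl _),
      bonGo_eq_found w.toList PySem.Set.empty]
  cases hfound : bonFound w.toList w.toList.length PySem.Set.empty with
  | none => rfl
  | some c =>
    obtain ⟨hcmem, hcnt⟩ := bonFound_count w.toList w.toList.length c (le_refl _) hfound
    have hA := mem_alpha_of_range _ (h2 c hcmem hcnt).1 (h2 c hcmem hcnt).2
    obtain ⟨k, hk⟩ := Option.isSome_iff_exists.mp ((PySem.List.index?_isSome_iff _ _).mpr hA)
    have hrank := bonRank_alpha c hA
    rw [hk] at hrank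
    simp at hrank
    have hidx : List.idxOf? c bonAlpha = some k := by
      rw [← PySem.List.index?_eq_idxOf?]; exact hk
    simp [bonV, bonBVal, hrank, hidx]
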